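-- pv_equiv track=rewrite | github.com/sermare/meta-coding-practice | tests/test_p031_custom_sort_string.py | _is_valid_custom_sort
-- ===== SOURCE A (Python) =====
-- def _is_valid_custom_sort(order, s, result):
--     """Check that result is a valid custom sort of s according to order."""
--     if result is None:
--         return False
--     # result must be a permutation of s
--     if sorted(result) != sorted(s):
--         return False
--     # Characters in order must appear in the correct relative order in result
--     order_index = {c: i for i, c in enumerate(order)}
--     filtered = [c for c in result if c in order_index]
--     for i in range(len(filtered) - 1):
--         if order_index[filtered[i]] > order_index[filtered[i + 1]]:
--             return False
--     return True
-- ===== SOURCE B (Python) =====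
-- def _is_valid_custom_sort(order, s, result):
--     """Check that result is a valid custom sort of s according to order."""
--     if result is None:
--         return False
--     # permutation check by multiset counts (no sorting)
--     rl, sl = list(result), list(s)
--     if len(rl) != len(sl):
--         return False
--     if any(rl.count(c) != sl.count(c) for c in rl):
--         return False
--     # one forward pass carrying the last seen order index (no filtered list)
--     idx = {c: i for i, c in enumerate(order)}
--     prev = None
--     for c in result:
--         if c in idx:
--             i = idx[c]
--             if prev is not None and i < prev:
--                 return False
--             prev = i
--     return True
-- ===== Notes on version B (the rewrite author's own statement) =====
-- stated objective: alternative
-- what changed: The sorted-lists permutation test is replaced by a length-plus-per-character-count check (no sorting), and the filtered-list adjacent-index loop is replaced by a single forward pass carrying the last seen order index in an Optional accumulator (no filtered list, no index arithmetic).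
import Mathlib
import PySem

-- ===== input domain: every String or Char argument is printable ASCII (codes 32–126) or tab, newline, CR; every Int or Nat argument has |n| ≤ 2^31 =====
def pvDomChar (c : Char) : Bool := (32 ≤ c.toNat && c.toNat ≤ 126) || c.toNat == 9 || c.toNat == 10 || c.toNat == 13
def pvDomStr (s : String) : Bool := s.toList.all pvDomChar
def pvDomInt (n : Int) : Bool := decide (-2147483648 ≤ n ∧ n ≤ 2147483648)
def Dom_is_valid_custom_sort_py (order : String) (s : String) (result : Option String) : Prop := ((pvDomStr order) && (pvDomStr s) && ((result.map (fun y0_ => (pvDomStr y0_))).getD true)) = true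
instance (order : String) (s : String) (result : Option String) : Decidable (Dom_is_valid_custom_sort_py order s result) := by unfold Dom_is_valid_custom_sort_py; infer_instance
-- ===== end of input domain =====

-- B replaces A's sorted-lists permutation test by a length + per-character count check, and A's
-- filtered-list adjacent-index scan by one forward pass carrying the last seen order index in an
-- Option accumulator; same return value, objective: alternative (no speed claim).

-- ===== PORT A =====
def is_valid_custom_sort_py (order : String) (s : String) (result : Option String) : Bool :=
  match result with
  | none => false
  | some r =>
    if PySem.List.sorted r.toList (fun c => c) false ≠ PySem.List.sorted s.toList (fun c => c) false then
      false
    else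
      let order_index : PySem.Dict Char Int :=
        (PySem.List.enumerate order.toList).foldl (fun d p => d.insert p.2 p.1) PySem.Dict.empty
      let filtered : List Char := r.toList.filter (fun c => order_index.contains c)
      -- for i in range(len(filtered)-1): if ... : return False / return True
      -- order_index[filtered[i]] cannot raise (filtered keeps only keys of order_index),
      -- so the defaults of getD/pyGetD are never used
      (PySem.List.pyRange 0 ((filtered.length : Int) - 1) 1).all (fun i =>
        !(order_index.getD (PySem.List.pyGetD filtered i ' ') 0 >
          order_index.getD (PySem.List.pyGetD filtered (i + 1) ' ') 0))

-- ===== PORT B =====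
-- the 'for c in result' loop of Source B with its early return: prev is the Python variable prev
-- (None ↔ no ordered character seen yet); idx[c] after the 'c in idx' test cannot raise, so getD's
-- default is never used
def chkOrder (idx : PySem.Dict Char Int) : List Char → Option Int → Bool
  | [], _ => true
  | c :: rest, prev =>
    if idx.contains c then
      let i := idx.getD c 0
      match prev with
      | some p => if i < p then false else chkOrder idx rest (some i)
      | none => chkOrder idx rest (some i)
    else chkOrder idx rest prev

def is_valid_custom_sort_py_alt (order : String) (s : String) (result : Option String) : Bool :=
  match result with
  | none => false
  | some r =>
    let rl : List Char := r.toList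
    let sl : List Char := s.toList
    if PySem.List.len rl ≠ PySem.List.len sl then false
    else if rl.any (fun c => PySem.List.count rl c ≠ PySem.List.count sl c) then false
    else
      let idx : PySem.Dict Char Int :=
        (PySem.List.enumerate order.toList).foldl (fun d p => d.insert p.2 p.1) PySem.Dict.empty
      chkOrder idx rl none

-- ===== PRECONDITION & SPEC =====
def Spec_is_valid_custom_sort_py (order : String) (s : String) (result : Option String) (out : Bool) : Prop := out = is_valid_custom_sort_py_alt order s result
instance (order : String) (s : String) (result : Option String) (out : Bool) : Decidable (Spec_is_valid_custom_sort_py order s result out) := by unfold Spec_is_valid_custom_sort_py; infer_instance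

-- ===== CLAIM (what is proved, stated in full; the proofs are below) =====
def Claim_equal_is_valid_custom_sort_py : Prop := ∀ (order : String) (s : String) (result : Option String), Dom_is_valid_custom_sort_py order s result → Spec_is_valid_custom_sort_py order s result (is_valid_custom_sort_py order s result)

-- ===== LEMMAS AND PROOFS =====

-- A's permutation test (equal sorted lists) is B's test (equal lengths and per-character counts).
theorem perm_iff_len_counts (r s : List Char) :
    r.Perm s ↔ (r.length = s.length ∧ ∀ c ∈ r, r.count c = s.count c) := by
  constructor
  · exact fun h => ⟨h.length_eq, fun c _ => List.perm_iff_count.1 h c⟩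
  · rintro ⟨hlen, hc⟩
    have hrt : r.Perm (s.filter (fun a => decide (a ∈ r))) := by
      rw [List.perm_iff_count]
      intro a
      by_cases ha : a ∈ r
      · rw [List.count_filter (by simpa using ha)]; exact hc a ha
      · rw [List.count_eq_zero_of_not_mem ha, Eq.comm, List.count_eq_zero]
        intro hmem
        exact ha (by simpa using (List.mem_filter.1 hmem).2)
    have ht : s.filter (fun a => decide (a ∈ r)) = s :=
      List.Sublist.eq_of_length List.filter_sublist (by rw [← hrt.length_eq, hlen])
    exact ht ▸ hrt

-- A's adjacent scan over l decides "the key sequence along l is nondecreasing".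
theorem adjacent_scan_iff_chain (k : Char → Int) (l : List Char) :
    ((PySem.List.pyRange 0 ((l.length : Int) - 1) 1).all (fun i =>
        !(k (PySem.List.pyGetD l i ' ') > k (PySem.List.pyGetD l (i + 1) ' ')))) = true ↔
      List.IsChain (· ≤ ·) (l.map k) := by
  rw [List.isChain_map, List.isChain_iff_getElem, List.all_eq_true]
  constructor
  · intro h i hi
    have h0 : (0 : Int) ≤ (i : Int) := Int.natCast_nonneg i
    have h1 : (i : Int) < (l.length : Int) - 1 := by omega
    have hx := h i (by rw [PySem.List.mem_pyRange_one]; exact ⟨h0, h1⟩)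
    simp only [Bool.not_eq_true', decide_eq_false_iff_not, not_lt] at hx
    rw [PySem.List.pyGetD_eq_getElem l ' ' h0 (by omega),
      PySem.List.pyGetD_eq_getElem l ' ' (by omega : (0:Int) ≤ (i:Int) + 1) (by omega)] at hx
    have hc1 : ((i : Int)).toNat = i := by omega
    have hc2 : ((i : Int) + 1).toNat = i + 1 := by omega
    simpa only [hc1, hc2] using hx
  · intro h i hi
    rw [PySem.List.mem_pyRange_one] at hi
    obtain ⟨h0, h1⟩ := hi
    have hlt : i.toNat + 1 < l.length := by omega
    have hx := h i.toNat hlt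
    simp only [Bool.not_eq_true', decide_eq_false_iff_not, not_lt]
    rw [PySem.List.pyGetD_eq_getElem l ' ' h0 (by omega),
      PySem.List.pyGetD_eq_getElem l ' ' (by omega : (0:Int) ≤ i + 1) (by omega)]
    have hc : (i + 1).toNat = i.toNat + 1 := by omega
    simpa only [hc] using hx

-- B's forward pass decides the same chain condition on the kept characters
-- (prev.toList prefixes the already-established lower bound).
theorem chkOrder_iff_chain (idx : PySem.Dict Char Int) (l : List Char) (prev : Option Int) :
    chkOrder idx l prev = true ↔
      List.IsChain (· ≤ ·)
        (prev.toList ++ (l.filter (fun c => idx.contains c)).map (fun c => idx.getD c 0)) := by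
  induction l generalizing prev with
  | nil =>
    simp only [chkOrder, List.filter_nil, List.map_nil, List.append_nil]
    cases prev <;> simp
  | cons c rest ih =>
    by_cases hc : idx.contains c = true
    · simp only [chkOrder, hc, if_pos, List.filter_cons, List.map_cons]
      cases prev with
      | none =>
        simpa using ih (some (idx.getD c 0))
      | some p =>
        by_cases hlt : idx.getD c 0 < p
        · simp only [if_pos hlt]
          constructor
          · intro h; exact absurd h (by simp)
          · intro h
            rcases List.isChain_cons_cons.1 (by simpa using h) with ⟨hle, _⟩
            omega
        · simp only [if_neg hlt]
          rw [ih (some (idx.getD c 0))]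
          simp only [Option.toList_some, List.cons_append, List.nil_append,
            List.isChain_cons_cons]
          constructor
          · intro h; exact ⟨by omega, h⟩
          · intro h; exact h.2
    · simp only [chkOrder, hc, List.filter_cons, Bool.false_eq_true, if_false]
      exact ih prev

-- ===== VERDICT (by name: the statement is the Claim_ definition above) =====
theorem is_valid_custom_sort_py_spec : Claim_equal_is_valid_custom_sort_py := by
  intro order s result _
  unfold Spec_is_valid_custom_sort_py is_valid_custom_sort_py is_valid_custom_sort_py_alt
  match result with
  | none => rfl
  | some r =>
    simp only []
    by_cases hperm : r.toList.Perm s.toList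
    · -- both guards pass; the order checks agree
      have hg : PySem.List.sorted r.toList (fun c => c) false =
          PySem.List.sorted s.toList (fun c => c) false :=
        (PySem.List.sorted_id_eq_sorted_id_iff_perm _ _).2 hperm
      obtain ⟨hlen, hcnt⟩ := (perm_iff_len_counts _ _).1 hperm
      rw [if_neg (by simpa using hg)]
      rw [if_neg (by simp only [PySem.List.len_eq, ne_eq, Int.natCast_inj, not_not]; exact hlen)]
      rw [if_neg (by
        simp only [List.any_eq_true, not_exists]
        intro c
        simp only [PySem.List.count_eq, Bool.not_eq_true, decide_eq_false_iff_not, not_not,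
          not_and]
        intro hcmem
        exact hcnt c hcmem)]
      -- the two order checks
      rw [Bool.eq_iff_iff]
      have hB := chkOrder_iff_chain
        ((PySem.List.enumerate order.toList).foldl (fun d p => d.insert p.2 p.1) PySem.Dict.empty)
        r.toList none
      simp only [Option.toList_none, List.nil_append] at hB
      exact (adjacent_scan_iff_chain _ _).trans hB.symm
    · -- A's guard fires; one of B's two guards fires
      have hg : PySem.List.sorted r.toList (fun c => c) false ≠
          PySem.List.sorted s.toList (fun c => c) false := by
        intro h; exact hperm ((PySem.List.sorted_id_eq_sorted_id_iff_perm _ _).1 h)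
      rw [if_pos (by simpa using hg)]
      by_cases hlen : r.toList.length = s.toList.length
      · have hcnt : ∃ c ∈ r.toList, r.toList.count c ≠ s.toList.count c := by
          by_contra hno
          push Not at hno
          exact hperm ((perm_iff_len_counts _ _).2 ⟨hlen, hno⟩)
        rw [if_neg (by simp only [PySem.List.len_eq, ne_eq, Int.natCast_inj, not_not]; exact hlen)]
        rw [if_pos (by
          obtain ⟨c, hcm, hcv⟩ := hcnt
          simp only [List.any_eq_true]
          exact ⟨c, hcm, by simp [PySem.List.count_eq, hcv]⟩)]
      · rw [if_pos (by simp only [PySem.List.len_eq, ne_eq, Int.natCast_inj]; exact hlen)]
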